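-- pv_equiv track=rewrite | github.com/kopsha/chatty-patty | src/open_trader.py | most_recent
-- ===== SOURCE A (Python) =====
-- from enum import StrEnum, auto
--
-- class MarketSignal(StrEnum):
--     HOLD = auto()
--     BUY = auto()
--     SELL = auto()
--
-- def most_recent(signals: list[MarketSignal]):
--     last_signal = MarketSignal.HOLD
--     distance = 0
--     for i, signal in enumerate(reversed(signals)):
--         if signal != MarketSignal.HOLD:
--             last_signal = signal
--             distance = i
--             break
--     return last_signal, distance
-- ===== SOURCE B (Python) =====
-- from enum import StrEnum, auto
--
-- class MarketSignal(StrEnum):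
--     HOLD = auto()
--     BUY = auto()
--     SELL = auto()
--
-- def most_recent(signals: list[MarketSignal]):
--     last_signal = MarketSignal.HOLD
--     last_index = -1
--     for i, sig in enumerate(signals):
--         if sig != MarketSignal.HOLD:
--             last_signal = sig
--             last_index = i
--     if last_index == -1:
--         return MarketSignal.HOLD, 0
--     return last_signal, len(signals) - 1 - last_index
-- ===== Notes on version B (the rewrite author's own statement) =====
-- stated objective: alternative
-- what changed: B replaces A's reversed-iteration with early break by a single forward pass that records the last non-HOLD signal and its absolute index, deriving the distance arithmetically as len(signals)-1-last_index after the loop.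
import Mathlib
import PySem

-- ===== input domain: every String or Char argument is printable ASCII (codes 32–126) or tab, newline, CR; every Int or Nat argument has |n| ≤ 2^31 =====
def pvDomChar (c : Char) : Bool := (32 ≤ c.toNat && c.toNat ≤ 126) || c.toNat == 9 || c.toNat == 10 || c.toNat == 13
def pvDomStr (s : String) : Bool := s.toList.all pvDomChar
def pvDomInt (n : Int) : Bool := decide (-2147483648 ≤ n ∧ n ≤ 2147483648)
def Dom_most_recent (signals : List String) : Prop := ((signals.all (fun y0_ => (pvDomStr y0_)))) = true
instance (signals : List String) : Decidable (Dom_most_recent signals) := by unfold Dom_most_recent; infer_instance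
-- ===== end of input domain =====

-- ===== PORT A =====
-- B is an alternative single-pass formulation of A (same cost); return-value equivalence proved below.
-- helper for A: scan the reversed list, returning the first non-"hold" signal and its index
def goA : List String → Int → String × Int
  | [], _ => ("hold", 0)
  | s :: rest, i => if s ≠ "hold" then (s, i) else goA rest (i + 1)

def most_recent (signals : List String) : String × Int :=
  goA signals.reverse 0

-- ===== PORT B =====
def most_recent_alt (signals : List String) : String × Int :=
  let st := (PySem.List.enumerate signals 0).foldl
    (fun st (p : Int × String) => if p.2 ≠ "hold" then (p.2, p.1) else st) ("hold", (-1 : Int))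
  if st.2 = -1 then ("hold", 0) else (st.1, (signals.length : Int) - 1 - st.2)

-- ===== PRECONDITION & SPEC =====
def Spec_most_recent (signals : List String) (out : String × Int) : Prop := out = most_recent_alt signals
instance (signals : List String) (out : String × Int) : Decidable (Spec_most_recent signals out) := by unfold Spec_most_recent; infer_instance

-- ===== CLAIM (what is proved, stated in full; the proofs are below) =====
def Claim_equal_most_recent : Prop := ∀ (signals : List String), Dom_most_recent signals → Spec_most_recent signals (most_recent signals)

-- ===== LEMMAS AND PROOFS =====

theorem goA_allHold (r : List String) (i : Int) (h : ∀ s ∈ r, s = "hold") :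
    goA r i = ("hold", 0) := by
  induction r generalizing i with
  | nil => rfl
  | cons x xs ih =>
    have hx : x = "hold" := h x (List.mem_cons_self ..)
    simp [goA, hx]
    exact ih _ (fun s hs => h s (List.mem_cons_of_mem _ hs))

theorem goA_shift (r : List String) (i : Int) (h : ∃ s ∈ r, s ≠ "hold") :
    goA r i = ((goA r 0).1, (goA r 0).2 + i) := by
  induction r generalizing i with
  | nil => simp at h
  | cons x xs ih =>
    by_cases hx : x = "hold"
    · have h' : ∃ s ∈ xs, s ≠ "hold" := by
        rcases h with ⟨s, hs, hne⟩
        rcases List.mem_cons.mp hs with rfl | hmem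
        · exact absurd hx hne
        · exact ⟨s, hmem, hne⟩
      simp [goA, hx]
      rw [ih _ h', ih 1 h']
      simp [add_comm]
      ring
    · simp [goA, hx]

def foldB (l : List String) : String × Int :=
  (PySem.List.enumerate l 0).foldl
    (fun st (p : Int × String) => if p.2 ≠ "hold" then (p.2, p.1) else st) ("hold", (-1 : Int))

theorem foldB_append (l : List String) (x : String) :
    foldB (l ++ [x]) = if x ≠ "hold" then (x, (l.length : Int)) else foldB l := by
  unfold foldB
  rw [PySem.List.enumerate_append]
  simp [PySem.List.enumerate]

theorem foldB_neg_iff (l : List String) :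
    (foldB l).2 = -1 ↔ ∀ s ∈ l, s = "hold" := by
  induction l using List.reverseRecOn with
  | nil => simp [foldB, PySem.List.enumerate]
  | append_singleton l x ih =>
    rw [foldB_append]
    by_cases hx : x = "hold"
    · simp only [hx, ne_eq, not_true_eq_false, if_false, ih]
      constructor
      · intro h s hs
        rcases List.mem_append.mp hs with h1 | h2
        · exact h s h1
        · simpa using h2
      · intro h s hs; exact h s (List.mem_append.mpr (Or.inl hs))
    · simp only [ne_eq, hx, not_false_eq_true, if_true]
      constructor
      · intro h; exfalso; omega
      · intro h; exfalso; exact hx (h x (by simp))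

theorem alt_eq (signals : List String) :
    most_recent_alt signals =
      (if (foldB signals).2 = -1 then ("hold", 0)
       else ((foldB signals).1, (signals.length : Int) - 1 - (foldB signals).2)) := by
  rfl

theorem main_eq (signals : List String) : most_recent signals = most_recent_alt signals := by
  induction signals using List.reverseRecOn with
  | nil => rfl
  | append_singleton l x ih =>
    rw [alt_eq, foldB_append]
    unfold most_recent
    rw [List.reverse_append]
    by_cases hx : x = "hold"
    · subst hx
      simp only [ne_eq, not_true_eq_false, if_false, List.reverse_singleton,
        List.singleton_append, goA]
      by_cases hall : (foldB l).2 = -1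
      · have hh : ∀ s ∈ l, s = "hold" := (foldB_neg_iff l).mp hall
        rw [goA_allHold _ _ (fun s hs => hh s (List.mem_reverse.mp hs))]
        simp [hall]
      · have h' : ∃ s ∈ l.reverse, s ≠ "hold" := by
          by_contra hnone
          simp only [not_exists, not_and, not_not] at hnone
          exact hall ((foldB_neg_iff l).mpr (fun s hs => hnone s (List.mem_reverse.mpr hs)))
        rw [show (0:Int)+1 = 1 from rfl, goA_shift _ 1 h']
        rw [alt_eq] at ih
        unfold most_recent at ih
        rw [if_neg hall] at ih
        rw [ih]
        simp [hall]
        omega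
    · simp only [ne_eq, hx, not_false_eq_true, if_true, List.reverse_singleton,
        List.singleton_append, goA]
      have hlen : ((l.length : Int)) ≠ -1 := by omega
      simp [hlen]

-- ===== VERDICT (by name: the statement is the Claim_ definition above) =====
theorem most_recent_spec : Claim_equal_most_recent := by
  intro signals _
  unfold Spec_most_recent
  exact main_eq signals
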